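-- pv_equiv track=rewrite | github.com/plantChips/rl-rv-study | rq3/scripts/rq3_trace_dist.py | count_distances
-- ===== SOURCE A (Python) =====
-- def count_distances(series):
--     distances = []
--     last_one_idx = None
--     for idx, val in enumerate(series):
--         if val == 1:
--             if last_one_idx is not None:
--                 dist = idx - last_one_idx
--                 distances.append(dist)
--             last_one_idx = idx
--     return distances
-- ===== SOURCE B (Python) =====
-- def count_distances(series):
--     ones = [i for i, v in enumerate(series) if v == 1]
--     return [b - a for a, b in zip(ones, ones[1:])]
-- ===== Notes on version B (the rewrite author's own statement) =====
-- stated objective: simpler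
-- what changed: Replaces the single-pass last-index state machine with a two-step decomposition: collect positions of 1s, then take pairwise differences of consecutive positions.
import Mathlib
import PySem

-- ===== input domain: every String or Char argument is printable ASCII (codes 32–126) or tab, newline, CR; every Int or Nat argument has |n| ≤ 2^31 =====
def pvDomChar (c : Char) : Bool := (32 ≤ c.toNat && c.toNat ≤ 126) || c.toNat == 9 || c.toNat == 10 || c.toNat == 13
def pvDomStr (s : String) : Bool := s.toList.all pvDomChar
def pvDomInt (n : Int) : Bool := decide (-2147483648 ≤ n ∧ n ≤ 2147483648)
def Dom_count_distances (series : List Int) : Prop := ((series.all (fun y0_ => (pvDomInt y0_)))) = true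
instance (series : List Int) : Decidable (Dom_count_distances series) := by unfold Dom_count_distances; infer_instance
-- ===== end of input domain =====

-- B is a structurally different decomposition of the same task (collect 1-positions, then pairwise diffs); same return value.

-- ===== PORT A =====
-- one loop-iteration of A's for-loop: state is (distances, last_one_idx)
def cdStepA (st : List Int × Option Int) (p : Int × Int) : List Int × Option Int :=
  if p.2 = 1 then
    match st.2 with
    | none => (st.1, some p.1)
    | some j => (st.1 ++ [p.1 - j], some p.1)
  else st

def count_distances (series : List Int) : List Int :=
  ((PySem.List.enumerate series).foldl cdStepA ([], none)).1

-- ===== PORT B =====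
def count_distances_alt (series : List Int) : List Int :=
  let ones : List Int := (PySem.List.enumerate series).filterMap
    (fun p => if p.2 = 1 then some p.1 else none)
  (ones.zip (ones.drop 1)).map (fun q => q.2 - q.1)

-- ===== PRECONDITION & SPEC =====
def Spec_count_distances (series : List Int) (out : List Int) : Prop := out = count_distances_alt series
instance (series : List Int) (out : List Int) : Decidable (Spec_count_distances series out) := by unfold Spec_count_distances; infer_instance

-- ===== CLAIM (what is proved, stated in full; the proofs are below) =====
def Claim_equal_count_distances : Prop := ∀ (series : List Int), Dom_count_distances series → Spec_count_distances series (count_distances series)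

-- ===== LEMMAS AND PROOFS =====

-- consecutive pairwise differences of a list of positions
def cdDiffs : List Int → List Int
  | x :: y :: t => (y - x) :: cdDiffs (y :: t)
  | _ => []

def cdSeed : Option Int → List Int
  | none => []
  | some j => [j]

def cdOnes (l : List (Int × Int)) : List Int :=
  l.filterMap (fun p => if p.2 = 1 then some p.1 else none)

theorem cd_fold_spec (l : List (Int × Int)) (ds : List Int) (last : Option Int) :
    (l.foldl cdStepA (ds, last)).1 = ds ++ cdDiffs (cdSeed last ++ cdOnes l) := by
  induction l generalizing ds last with
  | nil =>
      simp [cdOnes]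
      cases last <;> simp [cdSeed, cdDiffs]
  | cons p t ih =>
      by_cases h : p.2 = 1
      · cases last with
        | none =>
            simp [List.foldl_cons, cdStepA, h, ih, cdSeed, cdOnes]
        | some j =>
            simp [List.foldl_cons, cdStepA, h, ih, cdSeed, cdOnes, cdDiffs]
      · simp [List.foldl_cons, cdStepA, h, ih, cdOnes]

theorem cd_zip_diffs (l : List Int) :
    (l.zip (l.drop 1)).map (fun q : Int × Int => q.2 - q.1) = cdDiffs l := by
  induction l with
  | nil => simp [cdDiffs]
  | cons x t ih =>
      cases t with
      | nil => simp [cdDiffs]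
      | cons y s =>
          simp only [List.drop_one, List.tail_cons, List.zip_cons_cons, List.map_cons, cdDiffs]
          simpa [List.drop_one] using ih

-- ===== VERDICT (by name: the statement is the Claim_ definition above) =====
theorem count_distances_spec : Claim_equal_count_distances := by
  intro series _
  show count_distances series = count_distances_alt series
  unfold count_distances count_distances_alt
  rw [cd_fold_spec, cd_zip_diffs]
  simp [cdSeed, cdOnes]
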